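-- pv_equiv track=rewrite | github.com/skamble7/Raina_IBA | api/iba/steps/generate_adrs.py | chunk_artifacts_globally
-- ===== SOURCE A (Python) =====
-- from typing import List, Dict
--
-- def chunk_artifacts_globally(artifacts: Dict[str, List[Dict]], max_items: int = 8) -> List[Dict[str, List[Dict]]]:
--     flat_items = []
--     for artifact_type, items in artifacts.items():
--         for item in items:
--             flat_items.append((artifact_type, item))
--
--     chunks = []
--     current_chunk: Dict[str, List[Dict]] = {}
--
--     for artifact_type, item in flat_items:
--         if artifact_type not in current_chunk:
--             current_chunk[artifact_type] = []
--         current_chunk[artifact_type].append(item)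
--
--         total_items = sum(len(v) for v in current_chunk.values())
--         if total_items >= max_items:
--             chunks.append(current_chunk)
--             current_chunk = {}
--
--     if current_chunk:
--         chunks.append(current_chunk)
--
--     return chunks
-- ===== SOURCE B (Python) =====
-- def chunk_artifacts_globally(artifacts, max_items=8):
--     flat_items = [(artifact_type, item)
--                   for artifact_type, items in artifacts.items()
--                   for item in items]
--     step = max(max_items, 1)
--     chunks = []
--     for i in range(0, len(flat_items), step):
--         group = {}
--         for artifact_type, item in flat_items[i:i + step]:
--             group.setdefault(artifact_type, []).append(item)
--         chunks.append(group)
--     return chunks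
-- ===== Notes on version B (the rewrite author's own statement) =====
-- stated objective: faster
-- what changed: Replaces A's accumulate-and-flush pass, which re-sums the sizes of every list in the current chunk after each item, with slicing the flat item list into fixed windows of max(max_items,1) items and regrouping each slice into its own dict.
import Mathlib
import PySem

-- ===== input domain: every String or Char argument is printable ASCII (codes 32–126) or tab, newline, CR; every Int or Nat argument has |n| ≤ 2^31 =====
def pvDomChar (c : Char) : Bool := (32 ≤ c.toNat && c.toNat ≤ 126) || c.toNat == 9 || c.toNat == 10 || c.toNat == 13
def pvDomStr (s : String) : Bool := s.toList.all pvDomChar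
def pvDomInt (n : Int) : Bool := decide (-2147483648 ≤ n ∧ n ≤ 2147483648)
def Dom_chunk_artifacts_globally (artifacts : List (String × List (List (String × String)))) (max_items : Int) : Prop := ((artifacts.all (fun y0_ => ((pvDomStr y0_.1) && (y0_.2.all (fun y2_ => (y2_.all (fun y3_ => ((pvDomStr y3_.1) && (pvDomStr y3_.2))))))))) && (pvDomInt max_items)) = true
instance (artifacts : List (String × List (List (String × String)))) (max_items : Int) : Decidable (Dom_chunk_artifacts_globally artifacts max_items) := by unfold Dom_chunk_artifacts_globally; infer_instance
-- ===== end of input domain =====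

-- B re-chunks by slicing the flat item list into fixed windows of max(max_items,1)
-- items and regrouping each slice, instead of A's accumulate-and-flush single pass.


-- ===== PORT A =====
-- A-side helpers: the flatten loop, the body of the loop over flat_items, and the final flush.
def pvFlatA (artifacts : List (String × List (List (String × String)))) :
    List (String × List (String × String)) :=
  artifacts.foldl (fun acc p => acc ++ p.2.map (fun item => (p.1, item))) []

def pvStepA (max_items : Int)
    (st : List (List (String × List (List (String × String)))) ×
          PySem.Dict String (List (List (String × String))))
    (p : String × List (String × String)) :
    List (List (String × List (List (String × String)))) ×
      PySem.Dict String (List (List (String × String))) :=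
  -- if artifact_type not in current_chunk: current_chunk[artifact_type] = []
  let cur := if st.2.contains p.1 then st.2 else st.2.insert p.1 []
  -- current_chunk[artifact_type].append(item)
  let cur := cur.modify p.1 [] (· ++ [p.2])
  -- total_items = sum(len(v) for v in current_chunk.values())
  let total : Int := cur.values.foldl (fun a v => a + (v.length : Int)) 0
  if max_items ≤ total then (st.1 ++ [cur.items], PySem.Dict.empty) else (st.1, cur)

def chunk_artifacts_globally (artifacts : List (String × List (List (String × String)))) (max_items : Int) : List (List (String × List (List (String × String)))) :=
  let flat_items := pvFlatA artifacts
  let st := flat_items.foldl (pvStepA max_items) ([], PySem.Dict.empty)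
  if st.2.items ≠ [] then st.1 ++ [st.2.items] else st.1

-- ===== PORT B =====
-- B-side helpers: regroup one slice into a dict; chunk the flat list window by window
-- (pvChunksOf n l uses windows of size n+1; B calls it with n = step.toNat - 1, step ≥ 1).
def pvRegroup (l : List (String × List (String × String))) :
    PySem.Dict String (List (List (String × String))) :=
  l.foldl (fun d p => d.modify p.1 [] (· ++ [p.2])) PySem.Dict.empty

def pvChunksOf (n : Nat) :
    List (String × List (String × String)) →
      List (List (String × List (List (String × String))))
  | [] => []
  | x :: xs =>
      (pvRegroup ((x :: xs).take (n + 1))).items :: pvChunksOf n ((x :: xs).drop (n + 1))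
  termination_by l => l.length
  decreasing_by simp

def chunk_artifacts_globally_alt (artifacts : List (String × List (List (String × String)))) (max_items : Int) : List (List (String × List (List (String × String)))) :=
  let flat_items := artifacts.flatMap (fun p => p.2.map (fun item => (p.1, item)))
  let step := max max_items 1
  pvChunksOf (step.toNat - 1) flat_items

-- ===== PRECONDITION & SPEC =====
def Spec_chunk_artifacts_globally (artifacts : List (String × List (List (String × String)))) (max_items : Int) (out : List (List (String × List (List (String × String))))) : Prop := out = chunk_artifacts_globally_alt artifacts max_items
instance (artifacts : List (String × List (List (String × String)))) (max_items : Int) (out : List (List (String × List (List (String × String))))) : Decidable (Spec_chunk_artifacts_globally artifacts max_items out) := by unfold Spec_chunk_artifacts_globally; infer_instance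

-- ===== CLAIM (what is proved, stated in full; the proofs are below) =====
def Claim_equal_chunk_artifacts_globally : Prop := ∀ (artifacts : List (String × List (List (String × String)))) (max_items : Int), Dom_chunk_artifacts_globally artifacts max_items → Spec_chunk_artifacts_globally artifacts max_items (chunk_artifacts_globally artifacts max_items)

-- ===== LEMMAS AND PROOFS =====

theorem pvFlat_eq (artifacts : List (String × List (List (String × String)))) :
    pvFlatA artifacts = artifacts.flatMap (fun p => p.2.map (fun item => (p.1, item))) := by
  rw [pvFlatA, PySem.List.foldl_append_eq_flatMap]
  simp

-- A's "ensure the key exists, then append" is a single Dict.modify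
theorem pvModifyA (d : PySem.Dict String (List (List (String × String))))
    (k : String) (v : List (String × String)) :
    (if d.contains k then d else d.insert k []).modify k [] (· ++ [v]) =
      d.modify k [] (· ++ [v]) := by
  by_cases h : d.contains k
  · simp [h]
  · rw [Bool.not_eq_true] at h
    have hg : d.getD k [] = [] := PySem.Dict.getD_of_not_contains d [] h
    simp [h, PySem.Dict.modify, PySem.Dict.getD_insert_self,
      PySem.Dict.insert_insert_self, hg]

theorem pvFoldlSum (l : List (List (List (String × String)))) (a : Int) :
    l.foldl (fun a w => a + (w.length : Int)) a
      = a + (l.map (fun w => (w.length : Int))).sum := by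
  induction l generalizing a with
  | nil => simp
  | cons x xs ih => simp [ih]; ring

theorem pvRepSum (its : List (String × List (List (String × String)))) (k : String)
    (w : List (List (String × String)))
    (hnd : (its.map Prod.fst).Nodup) (hany : (its.any (fun p => p.1 == k)) = true) :
    ((its.map (fun p => if (p.1 == k) = true then (k, w) else p)).map
        (fun p => (p.2.length : Int))).sum
      = (its.map (fun p => (p.2.length : Int))).sum
          - (((PySem.Dict.mk its).getD k []).length : Int) + w.length := by
  induction its with
  | nil => simp at hany
  | cons a rest ih =>
    simp only [List.map_cons, List.nodup_cons] at hnd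
    by_cases h : (a.1 == k) = true
    · have hk : a.1 = k := by exact eq_of_beq h
      have hrest : ∀ p ∈ rest, (p.1 == k) = false := by
        intro p hp
        have : p.1 ∈ rest.map Prod.fst := List.mem_map_of_mem hp
        have : p.1 ≠ k := by rintro rfl; exact hnd.1 (hk ▸ this)
        simpa using this
      have hmap : rest.map (fun p => if (p.1 == k) = true then (k, w) else p) = rest := by
        rw [List.map_congr_left (g := id) ?_, List.map_id]
        intro p hp; simp [hrest p hp]
      have hgd : (PySem.Dict.mk (a :: rest)).getD k [] = a.2 := by
        rcases a with ⟨a1, a2⟩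
        simp [PySem.Dict.getD_eq_get?_getD, PySem.Dict.get?_mk_cons, h]
      simp only [List.map_cons, h, if_pos, hmap, hgd, List.sum_cons]
      ring
    · have hgd : (PySem.Dict.mk (a :: rest)).getD k [] = (PySem.Dict.mk rest).getD k [] := by
        rcases a with ⟨a1, a2⟩
        simp only [PySem.Dict.getD_eq_get?_getD, PySem.Dict.get?_mk_cons]
        simp at h
        simp [h]
      have hany' : (rest.any (fun p => p.1 == k)) = true := by
        simp only [List.any_cons, h, Bool.false_or] at hany; exact hany
      simp only [List.map_cons, h, List.sum_cons, hgd, Bool.false_eq_true, if_false]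
      rw [ih hnd.2 hany']
      ring

theorem pvSum_modify (d : PySem.Dict String (List (List (String × String))))
    (k : String) (v : List (String × String)) (h : d.keys.Nodup) :
    (d.modify k [] (· ++ [v])).values.foldl (fun a w => a + (w.length : Int)) 0 =
      d.values.foldl (fun a w => a + (w.length : Int)) 0 + 1 := by
  rw [pvFoldlSum, pvFoldlSum]
  simp only [PySem.Dict.values, List.map_map]
  by_cases hc : d.contains k = true
  · rw [PySem.Dict.modify, PySem.Dict.insert, if_pos hc]
    have := pvRepSum d.items k (d.getD k [] ++ [v]) h hc
    simp only [List.map_map] at this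
    rcases d with ⟨its⟩
    simp only [List.map_map, Function.comp_def] at this ⊢
    rw [this]
    simp only [List.length_append, List.length_cons, List.length_nil]
    push_cast
    ring
  · rw [PySem.Dict.modify, PySem.Dict.insert, if_neg hc]
    have hg : d.getD k [] = [] :=
      PySem.Dict.getD_of_not_contains d [] (Bool.not_eq_true _ |>.mp hc)
    simp [hg, Function.comp]

theorem pvNodup_modify (d : PySem.Dict String (List (List (String × String))))
    (k : String) (v : List (String × String)) (h : d.keys.Nodup) :
    (d.modify k [] (· ++ [v])).keys.Nodup := by
  rw [PySem.Dict.keys_modify]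
  by_cases hc : d.contains k = true
  · rw [PySem.Dict.keys_insert_of_contains _ _ hc]; exact h
  · rw [PySem.Dict.keys_insert_of_not_contains _ _ (Bool.not_eq_true _ |>.mp hc)]
    refine List.Nodup.append h (by simp) ?_
    intro x hx hx'
    simp only [List.mem_singleton] at hx'
    exact hc ((PySem.Dict.contains_iff_mem_keys d k).mpr (hx' ▸ hx))

theorem pvG_sum (l : List (String × List (String × String)))
    (d : PySem.Dict String (List (List (String × String)))) (h : d.keys.Nodup) :
    (l.foldl (fun d p => d.modify p.1 [] (· ++ [p.2])) d).values.foldl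
        (fun a w => a + (w.length : Int)) 0
      = d.values.foldl (fun a w => a + (w.length : Int)) 0 + l.length := by
  induction l generalizing d with
  | nil => simp
  | cons x xs ih =>
    simp only [List.foldl_cons, List.length_cons]
    rw [ih _ (pvNodup_modify d x.1 x.2 h), pvSum_modify d x.1 x.2 h]
    push_cast; ring

theorem pvRegroup_sum (p : List (String × List (String × String))) :
    (pvRegroup p).values.foldl (fun a w => a + (w.length : Int)) 0 = p.length := by
  rw [pvRegroup, pvG_sum p PySem.Dict.empty (by simp [PySem.Dict.empty, PySem.Dict.keys])]
  simp [PySem.Dict.empty, PySem.Dict.values]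

theorem pvModify_ne_nil (d : PySem.Dict String (List (List (String × String))))
    (k : String) (v : List (List (String × String)) → List (List (String × String))) :
    (d.modify k [] v).items ≠ [] := by
  rw [PySem.Dict.modify, PySem.Dict.insert]
  by_cases hc : d.contains k = true
  · rw [if_pos hc]
    rcases d with ⟨its⟩
    cases its with
    | nil => simp [PySem.Dict.contains] at hc
    | cons a r => simp
  · rw [if_neg hc]; simp

theorem pvRegroup_ne_nil (p : List (String × List (String × String))) (h : p ≠ []) :
    (pvRegroup p).items ≠ [] := by
  cases p with
  | nil => exact absurd rfl h
  | cons x xs =>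
    rw [pvRegroup, List.foldl_cons]
    have : ∀ (l : List (String × List (String × String)))
        (d : PySem.Dict String (List (List (String × String)))), d.items ≠ [] →
        (l.foldl (fun d p => d.modify p.1 [] (· ++ [p.2])) d).items ≠ [] := by
      intro l
      induction l with
      | nil => intro d hd; exact hd
      | cons y ys ih => intro d _; exact ih _ (pvModify_ne_nil d y.1 _)
    exact this xs _ (pvModify_ne_nil PySem.Dict.empty x.1 _)

theorem pvChunksOf_cons (n : Nat) (l : List (String × List (String × String))) (h : l ≠ []) :
    pvChunksOf n l = (pvRegroup (l.take (n + 1))).items :: pvChunksOf n (l.drop (n + 1)) := by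
  cases l with
  | nil => exact absurd rfl h
  | cons x xs => rw [pvChunksOf]

theorem pvRegroup_snoc (p : List (String × List (String × String)))
    (x : String × List (String × String)) :
    pvRegroup (p ++ [x]) = (pvRegroup p).modify x.1 [] (· ++ [x.2]) := by
  simp [pvRegroup, List.foldl_append]

-- main loop invariant: starting from pending items p (p.length < max(max_items,1)),
-- A's flush loop over l followed by the final flush produces exactly B's window chunks of p ++ l
theorem pvMain (max_items : Int) (l p : List (String × List (String × String)))
    (chunks : List (List (String × List (List (String × String)))))
    (hlt : (p.length : Int) < max max_items 1) :
    (let st := l.foldl (pvStepA max_items) (chunks, pvRegroup p)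
     if st.2.items ≠ [] then st.1 ++ [st.2.items] else st.1) =
      chunks ++ pvChunksOf ((max max_items 1).toNat - 1) (p ++ l) := by
  have hmax1 : (1 : Int) ≤ max max_items 1 := le_max_right _ _
  have hmax2 : max_items ≤ max max_items 1 := le_max_left _ _
  have hmax3 : max max_items 1 = max_items ∨ max max_items 1 = 1 := max_choice _ _
  induction l generalizing p chunks with
  | nil =>
    simp only [List.foldl_nil, List.append_nil]
    cases hp : p with
    | nil => simp [pvRegroup, PySem.Dict.empty, pvChunksOf]
    | cons y ys =>
      have hne := pvRegroup_ne_nil p (by simp [hp])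
      rw [← hp]
      have htk : p.take ((max max_items 1).toNat - 1 + 1) = p := by
        apply List.take_of_length_le; omega
      have hdr : p.drop ((max max_items 1).toNat - 1 + 1) = [] := by
        apply List.drop_eq_nil_of_le; omega
      rw [pvChunksOf_cons _ _ (by simp [hp]), htk, hdr]
      simp [hne, pvChunksOf]
  | cons x rest ih =>
    simp only [List.foldl_cons]
    have hstep : pvStepA max_items (chunks, pvRegroup p) x =
        if max_items ≤ ((p.length : Int) + 1) then
          (chunks ++ [(pvRegroup (p ++ [x])).items], PySem.Dict.empty)
        else (chunks, pvRegroup (p ++ [x])) := by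
      rw [pvStepA]
      simp only []
      rw [pvModifyA, ← pvRegroup_snoc, pvRegroup_sum (p ++ [x])]
      simp
    rw [hstep]
    by_cases hcond : max_items ≤ ((p.length : Int) + 1)
    · rw [if_pos hcond]
      have h0 : ((List.length ([] : List (String × List (String × String)))) : Int)
          < max max_items 1 := by
        simp only [List.length_nil, Nat.cast_zero]
        exact lt_of_lt_of_le Int.zero_lt_one hmax1
      have hIH := ih [] (chunks ++ [(pvRegroup (p ++ [x])).items]) h0
      simp only [List.nil_append] at hIH
      rw [show PySem.Dict.empty = pvRegroup [] from rfl, hIH]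
      have hlen : p.length + 1 = (max max_items 1).toNat := by omega
      have hsplit : p ++ x :: rest = (p ++ [x]) ++ rest := by simp
      rw [hsplit,
        pvChunksOf_cons ((max max_items 1).toNat - 1) ((p ++ [x]) ++ rest) (by simp)]
      have htk : ((p ++ [x]) ++ rest).take ((max max_items 1).toNat - 1 + 1) = p ++ [x] := by
        apply List.take_left'
        simp; omega
      have hdr : ((p ++ [x]) ++ rest).drop ((max max_items 1).toNat - 1 + 1) = rest := by
        apply List.drop_left'
        simp; omega
      rw [htk, hdr]
      simp
    · rw [if_neg hcond]
      have hlt' : (((p ++ [x]).length : Int)) < max max_items 1 := by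
        simp; omega
      rw [ih (p ++ [x]) chunks hlt']
      simp

-- ===== VERDICT (by name: the statement is the Claim_ definition above) =====
theorem chunk_artifacts_globally_spec : Claim_equal_chunk_artifacts_globally := by
  intro artifacts max_items _
  unfold Spec_chunk_artifacts_globally chunk_artifacts_globally chunk_artifacts_globally_alt
  have h := pvMain max_items (artifacts.flatMap (fun p => p.2.map (fun item => (p.1, item)))) [] []
    (by simp only [List.length_nil, Nat.cast_zero]
        exact lt_of_lt_of_le Int.zero_lt_one (le_max_right _ _))
  simp only [pvFlat_eq]
  simp only [show PySem.Dict.empty = pvRegroup [] from rfl]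
  simpa using h
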